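-- pv_equiv track=rewrite | github.com/dylanyunlon/operatorRL | integrations/lol/src/lol_agent/aram_strategy_advisor.py | recommend_bench_swap
-- ===== SOURCE A (Python) =====
-- from typing import Any, Callable, Optional
--
-- def recommend_bench_swap(current_champion: int, bench_champions: list[int],
--                          aram_tier_data: dict[int, dict[str, Any]]) -> dict[str, Any]:
--     my_tier = aram_tier_data.get(current_champion, {}).get("tier", 3)
--     best_champ, best_tier = None, my_tier
--     for c in bench_champions:
--         c_tier = aram_tier_data.get(c, {}).get("tier", 3)
--         if c_tier < best_tier:
--             best_tier = c_tier
--             best_champ = c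
--     return {"swap_target": best_champ}
-- ===== SOURCE B (Python) =====
-- def recommend_bench_swap(current_champion, bench_champions, aram_tier_data):
--     def tier(champ):
--         return aram_tier_data.get(champ, {}).get("tier", 3)
--     ranked = sorted(bench_champions, key=tier)
--     if ranked and tier(ranked[0]) < tier(current_champion):
--         return {"swap_target": ranked[0]}
--     return {"swap_target": None}
-- ===== Notes on version B (the rewrite author's own statement) =====
-- stated objective: alternative
-- what changed: Replaces the single-pass running-minimum loop with a stable sort of the bench by tier followed by picking the head and comparing it to the current champion's tier.
import Mathlib
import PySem

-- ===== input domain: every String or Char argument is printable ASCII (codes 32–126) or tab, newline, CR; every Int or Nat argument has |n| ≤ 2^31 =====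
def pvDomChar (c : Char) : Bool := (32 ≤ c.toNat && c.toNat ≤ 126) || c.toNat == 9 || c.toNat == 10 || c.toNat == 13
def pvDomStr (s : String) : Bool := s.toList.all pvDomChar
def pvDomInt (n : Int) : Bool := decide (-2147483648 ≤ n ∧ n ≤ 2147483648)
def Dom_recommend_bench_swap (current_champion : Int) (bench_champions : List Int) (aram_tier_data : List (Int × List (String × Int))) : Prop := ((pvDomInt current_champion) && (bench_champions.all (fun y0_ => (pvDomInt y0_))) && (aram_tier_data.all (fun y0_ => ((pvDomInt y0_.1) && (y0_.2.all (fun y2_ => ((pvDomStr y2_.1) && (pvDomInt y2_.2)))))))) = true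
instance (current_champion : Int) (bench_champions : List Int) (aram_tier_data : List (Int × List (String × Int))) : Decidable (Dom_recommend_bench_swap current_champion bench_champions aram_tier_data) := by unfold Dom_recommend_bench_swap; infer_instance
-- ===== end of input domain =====

-- B replaces A's running-minimum loop by a stable sort of the bench by tier and picking
-- the head (alternative decomposition; same return value, no mutation in either version).

-- shared transcription of `aram_tier_data.get(c, {}).get("tier", 3)` (both Pythons compute it)
def pvTier (aram_tier_data : List (Int × List (String × Int))) (c : Int) : Int :=
  PySem.Dict.getD (PySem.Dict.mk (PySem.Dict.getD (PySem.Dict.mk aram_tier_data) c [])) "tier" 3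

-- ===== PORT A =====
def recommend_bench_swap (current_champion : Int) (bench_champions : List Int) (aram_tier_data : List (Int × List (String × Int))) : List (String × Option Int) :=
  let my_tier := pvTier aram_tier_data current_champion
  let st := bench_champions.foldl
    (fun (st : Option Int × Int) c =>
      let c_tier := pvTier aram_tier_data c
      if c_tier < st.2 then (some c, c_tier) else st)
    (none, my_tier)
  [("swap_target", st.1)]

-- ===== PORT B =====
def recommend_bench_swap_alt (current_champion : Int) (bench_champions : List Int) (aram_tier_data : List (Int × List (String × Int))) : List (String × Option Int) :=
  let ranked := PySem.List.sorted bench_champions (fun c => pvTier aram_tier_data c)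
  match ranked with
  | [] => [("swap_target", none)]
  | m :: _ =>
      if pvTier aram_tier_data m < pvTier aram_tier_data current_champion then
        [("swap_target", some m)]
      else [("swap_target", none)]

-- ===== PRECONDITION & SPEC =====
def Spec_recommend_bench_swap (current_champion : Int) (bench_champions : List Int) (aram_tier_data : List (Int × List (String × Int))) (out : List (String × Option Int)) : Prop := out = recommend_bench_swap_alt current_champion bench_champions aram_tier_data
instance (current_champion : Int) (bench_champions : List Int) (aram_tier_data : List (Int × List (String × Int))) (out : List (String × Option Int)) : Decidable (Spec_recommend_bench_swap current_champion bench_champions aram_tier_data out) := by unfold Spec_recommend_bench_swap; infer_instance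

-- ===== CLAIM (what is proved, stated in full; the proofs are below) =====
def Claim_equal_recommend_bench_swap : Prop := ∀ (current_champion : Int) (bench_champions : List Int) (aram_tier_data : List (Int × List (String × Int))), Dom_recommend_bench_swap current_champion bench_champions aram_tier_data → Spec_recommend_bench_swap current_champion bench_champions aram_tier_data (recommend_bench_swap current_champion bench_champions aram_tier_data)

-- ===== LEMMAS AND PROOFS =====

-- running first-minimum step (accumulator wins ties and earlier elements)
def pvH (k : Int → Int) (m x : Int) : Int := if k x < k m then x else m

-- A's loop step
def pvG (k : Int → Int) (st : Option Int × Int) (c : Int) : Option Int × Int :=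
  if k c < st.2 then (some c, k c) else st

theorem pvH_le (k : Int → Int) (t : List Int) (c : Int) :
    k (t.foldl (pvH k) c) ≤ k c := by
  induction t generalizing c with
  | nil => simp
  | cons d t ih =>
    simp only [List.foldl_cons]
    have h1 := ih (pvH k c d)
    have h2 : k (pvH k c d) ≤ k c := by simp only [pvH]; split <;> omega
    omega

-- displacement: if the first minimum of t beats c, prepending c does not change it
theorem pvH_displace (k : Int → Int) : ∀ (t : List Int) (d c : Int),
    k (t.foldl (pvH k) d) < k c →
    (d :: t).foldl (pvH k) c = t.foldl (pvH k) d := by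
  intro t
  induction t with
  | nil =>
    intro d c h
    simp only [List.foldl_nil] at h
    simp [pvH, h]
  | cons e t' ih =>
    intro d c hlt
    simp only [List.foldl_cons] at hlt ⊢
    by_cases hdc : k d < k c
    · rw [show pvH k c d = d from by simp [pvH, hdc]]
    · rw [show pvH k c d = c from by simp [pvH, hdc]]
      by_cases hed : k e < k d
      · rw [show pvH k d e = e from by simp [pvH, hed]] at hlt ⊢
        have := ih e c hlt
        simpa only [List.foldl_cons] using this
      · rw [show pvH k d e = d from by simp [pvH, hed]] at hlt ⊢
        rw [show pvH k c e = c from by simp [pvH]; omega]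
        have := ih d c hlt
        rw [List.foldl_cons, show pvH k c d = c from by simp [pvH, hdc]] at this
        exact this

-- if the fold from c drops strictly below c, it equals the fold without c
theorem pvH_drop (k : Int → Int) : ∀ (t : List Int) (d c : Int),
    k ((d :: t).foldl (pvH k) c) < k c →
    (d :: t).foldl (pvH k) c = t.foldl (pvH k) d := by
  intro t
  induction t with
  | nil =>
    intro d c h
    simp only [List.foldl_cons, List.foldl_nil, pvH] at h ⊢
    split at h
    · simp_all
    · omega
  | cons e t' ih =>
    intro d c hlt
    by_cases hdc : k d < k c
    · rw [show (d :: e :: t').foldl (pvH k) c = (e :: t').foldl (pvH k) d from by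
        simp [List.foldl_cons, pvH, hdc]] at hlt ⊢
    · have hstep : (d :: e :: t').foldl (pvH k) c = (e :: t').foldl (pvH k) c := by
        simp [List.foldl_cons, pvH, hdc]
      rw [hstep] at hlt ⊢
      have h1 := ih e c hlt
      rw [h1] at hlt ⊢
      exact (pvH_displace k t' e d (by omega)).symm

-- A's loop once locked onto a champion tracks the running first-minimum
theorem pvG_locked (k : Int → Int) (t : List Int) (c : Int) :
    t.foldl (pvG k) (some c, k c) = (some (t.foldl (pvH k) c), k (t.foldl (pvH k) c)) := by
  induction t generalizing c with
  | nil => simp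
  | cons d t ih =>
    simp only [List.foldl_cons]
    by_cases h : k d < k c
    · rw [show pvG k (some c, k c) d = (some d, k d) from by simp [pvG, h],
        show pvH k c d = d from by simp [pvH, h]]
      exact ih d
    · rw [show pvG k (some c, k c) d = (some c, k c) from by simp [pvG, h],
        show pvH k c d = c from by simp [pvH, h]]
      exact ih c

-- A's loop from the unlocked start state, on a nonempty bench
theorem pvG_unlocked (k : Int → Int) : ∀ (t' : List Int) (c : Int) (bt : Int),
    (c :: t').foldl (pvG k) (none, bt) =
      if k (t'.foldl (pvH k) c) < bt then
        (some (t'.foldl (pvH k) c), k (t'.foldl (pvH k) c))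
      else (none, bt) := by
  intro t'
  induction t' with
  | nil =>
    intro c bt
    simp only [List.foldl_cons, List.foldl_nil, pvG]
  | cons d t'' ih =>
    intro c bt
    by_cases h : k c < bt
    · rw [show (c :: d :: t'').foldl (pvG k) (none, bt)
          = (d :: t'').foldl (pvG k) (some c, k c) from by simp [List.foldl_cons, pvG, h]]
      rw [pvG_locked]
      have hle := pvH_le k (d :: t'') c
      rw [if_pos (by omega)]
    · rw [show (c :: d :: t'').foldl (pvG k) (none, bt)
          = (d :: t'').foldl (pvG k) (none, bt) from by simp [List.foldl_cons, pvG, h]]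
      rw [ih d bt]
      by_cases h2 : k (t''.foldl (pvH k) d) < bt
      · have hdisp : (d :: t'').foldl (pvH k) c = t''.foldl (pvH k) d :=
          pvH_displace k t'' d c (by omega)
        rw [if_pos h2, hdisp, if_pos h2]
      · rw [if_neg h2, if_neg ?_]
        intro hcon
        have hh : k ((d :: t'').foldl (pvH k) c) < k c := by omega
        have := pvH_drop k t'' d c hh
        rw [this] at hcon
        exact h2 hcon

-- head of the insertion-sort fold is the running first-minimum
theorem pvSorted_head (k : Int → Int) (t : List Int) : ∀ (acc : List Int) (c : Int),
    acc.head? = some c →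
    (t.foldl (fun acc x => PySem.List.insertBy (fun a b => decide (k a < k b)) x acc) acc).head?
      = some (t.foldl (pvH k) c) := by
  induction t with
  | nil => intro acc c hacc; simpa using hacc
  | cons x t ih =>
    intro acc c hacc
    simp only [List.foldl_cons]
    apply ih
    cases acc with
    | nil => simp at hacc
    | cons y ys =>
      simp only [List.head?_cons, Option.some.injEq] at hacc
      subst hacc
      by_cases h : k x < k y <;> simp [PySem.List.insertBy, pvH, h]

-- head of PySem's stable sort, on a nonempty list
theorem pvSorted_head' (k : Int → Int) (c : Int) (t : List Int) :
    (PySem.List.sorted (c :: t) k).head? = some (t.foldl (pvH k) c) := by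
  rw [PySem.List.sorted_eq_foldl_insertBy]
  simp only [List.foldl_cons]
  exact pvSorted_head k t (PySem.List.insertBy (fun a b => decide (k a < k b)) c []) c rfl

-- ===== VERDICT (by name: the statement is the Claim_ definition above) =====
theorem recommend_bench_swap_spec : Claim_equal_recommend_bench_swap := by
  intro cur bench data _
  unfold Spec_recommend_bench_swap recommend_bench_swap recommend_bench_swap_alt
  cases bench with
  | nil => rfl
  | cons c t =>
    have hfold : (c :: t).foldl
        (fun (st : Option Int × Int) x =>
          let c_tier := pvTier data x
          if c_tier < st.2 then (some x, c_tier) else st)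
        (none, pvTier data cur)
        = (c :: t).foldl (pvG (fun x => pvTier data x)) (none, pvTier data cur) := rfl
    simp only [hfold, pvG_unlocked]
    have hhead := pvSorted_head' (fun x => pvTier data x) c t
    cases hson : PySem.List.sorted (c :: t) (fun x => pvTier data x) with
    | nil => rw [hson] at hhead; simp at hhead
    | cons m rest =>
      rw [hson] at hhead
      simp only [List.head?_cons, Option.some.injEq] at hhead
      subst hhead
      by_cases h : pvTier data (t.foldl (pvH (fun x => pvTier data x)) c) < pvTier data cur
      · simp only [if_pos h]
      · simp only [if_neg h]
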